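-- pv_equiv track=rewrite | github.com/HrLi97/dataPipeline_ops | common/segmenter.py | split_scene_recursively
-- ===== SOURCE A (Python) =====
-- from typing import List, Tuple
--
-- def split_scene_recursively(scene: Tuple[int, int], fps: float, max_duration: int, min_duration: int) -> List[Tuple[int, int]]:
--     start_frame, end_frame = scene
--     scene_duration = end_frame - start_frame
--
--     if min_duration <= scene_duration <= max_duration:
--         return [scene]
--
--     if scene_duration > max_duration:
--         mid_frame = (start_frame + end_frame) // 2
--         left = (start_frame, mid_frame)
--         right = (mid_frame + 1, end_frame)
--         return (
--             split_scene_recursively(left, fps, max_duration, min_duration) +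
--             split_scene_recursively(right, fps, max_duration, min_duration)
--         )
--     return []
-- ===== SOURCE B (Python) =====
-- def split_scene_recursively(scene, fps, max_duration, min_duration):
--     # Iterative breadth-first splitting: repeatedly split every over-long
--     # interval in the current generation, then keep those within bounds.
--     segments = [scene]
--     while any(e - s > max_duration for s, e in segments):
--         nxt = []
--         for s, e in segments:
--             if e - s > max_duration:
--                 m = (s + e) // 2
--                 nxt.append((s, m))
--                 nxt.append((m + 1, e))
--             else:
--                 nxt.append((s, e))
--         segments = nxt
--     return [(s, e) for s, e in segments if min_duration <= e - s <= max_duration]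
-- ===== Notes on version B (the rewrite author's own statement) =====
-- stated objective: alternative
-- what changed: Replaces A's depth-first recursion with an iterative breadth-first loop that repeatedly splits every over-long interval of the current generation in place and finally filters the generation for intervals within [min_duration, max_duration].
import Mathlib
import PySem

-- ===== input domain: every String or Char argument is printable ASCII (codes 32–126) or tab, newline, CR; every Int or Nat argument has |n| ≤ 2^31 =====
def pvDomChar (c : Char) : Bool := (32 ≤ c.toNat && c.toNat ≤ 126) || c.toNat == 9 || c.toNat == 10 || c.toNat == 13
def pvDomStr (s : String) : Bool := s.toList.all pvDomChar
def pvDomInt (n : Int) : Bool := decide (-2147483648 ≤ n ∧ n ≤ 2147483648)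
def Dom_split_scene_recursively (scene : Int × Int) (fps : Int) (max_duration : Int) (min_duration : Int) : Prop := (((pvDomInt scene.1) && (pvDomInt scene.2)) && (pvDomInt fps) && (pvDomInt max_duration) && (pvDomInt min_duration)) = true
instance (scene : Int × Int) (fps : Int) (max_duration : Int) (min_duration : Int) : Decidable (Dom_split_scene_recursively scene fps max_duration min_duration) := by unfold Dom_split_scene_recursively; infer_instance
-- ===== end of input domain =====

-- B replaces A's depth-first recursion by an iterative breadth-first generation loop
-- with a final filter (objective: alternative decomposition, same cost).

-- ===== PORT A =====
-- A's recursion has no unconditional decreasing measure (it diverges when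
-- max_duration < 0 and the duration exceeds it, excluded by Pre_); the Nat fuel
-- ((e-s).toNat + 1) is a totality guard only: inside Pre_ the duration's toNat
-- strictly decreases at every recursive call, so the guard is never hit.
def goA (fuel : Nat) (scene : Int × Int) (fps : Int) (max_duration : Int) (min_duration : Int) : List (Int × Int) :=
  match fuel with
  | 0 => []
  | f + 1 =>
    let start_frame := scene.1
    let end_frame := scene.2
    let scene_duration := end_frame - start_frame
    if min_duration ≤ scene_duration ∧ scene_duration ≤ max_duration then [scene]
    else if scene_duration > max_duration then
      let mid_frame := PySem.Int.floordiv (start_frame + end_frame) 2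
      goA f (start_frame, mid_frame) fps max_duration min_duration ++
      goA f (mid_frame + 1, end_frame) fps max_duration min_duration
    else []

def split_scene_recursively (scene : Int × Int) (fps : Int) (max_duration : Int) (min_duration : Int) : List (Int × Int) :=
  goA ((scene.2 - scene.1).toNat + 1) scene fps max_duration min_duration

-- ===== PORT B =====
-- one pass of the inner 'for' loop of Source B (build nxt)
def bStep (max_duration : Int) (segments : List (Int × Int)) : List (Int × Int) :=
  segments.foldl (fun nxt p =>
    if p.2 - p.1 > max_duration then
      let m := PySem.Int.floordiv (p.1 + p.2) 2
      nxt ++ [(p.1, m), (m + 1, p.2)]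
    else nxt ++ [p]) []

-- the 'while any(...)' loop of Source B; the Nat fuel is a totality guard only:
-- inside Pre_ each round shrinks the longest over-long duration by at least one.
def bLoop (fuel : Nat) (max_duration : Int) (segments : List (Int × Int)) : List (Int × Int) :=
  match fuel with
  | 0 => segments
  | f + 1 =>
    if segments.any (fun p => decide (p.2 - p.1 > max_duration)) then
      bLoop f max_duration (bStep max_duration segments)
    else segments

def split_scene_recursively_alt (scene : Int × Int) (fps : Int) (max_duration : Int) (min_duration : Int) : List (Int × Int) :=
  (bLoop ((scene.2 - scene.1).toNat + 1) max_duration [scene]).filter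
    (fun p => decide (min_duration ≤ p.2 - p.1 ∧ p.2 - p.1 ≤ max_duration))

-- ===== PRECONDITION & SPEC =====
-- Pre_ excludes exactly the inputs on which A raises RecursionError (and Source B
-- loops forever): max_duration < 0 together with a duration above it, where
-- halving never gets the duration below the (negative) bound.
def Pre_split_scene_recursively (scene : Int × Int) (fps : Int) (max_duration : Int) (min_duration : Int) : Prop :=
  0 ≤ max_duration ∨ scene.2 - scene.1 ≤ max_duration

instance (scene : Int × Int) (fps : Int) (max_duration : Int) (min_duration : Int) : Decidable (Pre_split_scene_recursively scene fps max_duration min_duration) := by unfold Pre_split_scene_recursively; infer_instance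

def pvWitness_split_scene_recursively : (Int × Int) × Int × Int × Int := ((0, 10), 25, 4, 1)

def Spec_split_scene_recursively (scene : Int × Int) (fps : Int) (max_duration : Int) (min_duration : Int) (out : List (Int × Int)) : Prop := out = split_scene_recursively_alt scene fps max_duration min_duration
instance (scene : Int × Int) (fps : Int) (max_duration : Int) (min_duration : Int) (out : List (Int × Int)) : Decidable (Spec_split_scene_recursively scene fps max_duration min_duration out) := by unfold Spec_split_scene_recursively; infer_instance

-- ===== CLAIM (what is proved, stated in full; the proofs are below) =====
def Claim_equal_split_scene_recursively : Prop := ∀ (scene : Int × Int) (fps : Int) (max_duration : Int) (min_duration : Int), Dom_split_scene_recursively scene fps max_duration min_duration → Pre_split_scene_recursively scene fps max_duration min_duration → Spec_split_scene_recursively scene fps max_duration min_duration (split_scene_recursively scene fps max_duration min_duration)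

-- ===== LEMMAS AND PROOFS =====

-- the common mathematical value of both programs inside Pre_, by well-founded
-- recursion on the duration (the 0 ≤ maxd guard makes the measure decrease)
def splitSpec (s e maxd mind : Int) : List (Int × Int) :=
  if mind ≤ e - s ∧ e - s ≤ maxd then [(s, e)]
  else if h : maxd < e - s ∧ 0 ≤ maxd then
    splitSpec s (PySem.Int.floordiv (s + e) 2) maxd mind ++
    splitSpec (PySem.Int.floordiv (s + e) 2 + 1) e maxd mind
  else []
termination_by (e - s).toNat
decreasing_by
  · have hm := PySem.Int.floordiv_eq_ediv_of_pos (a := s + e) (b := 2) (by norm_num)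
    omega
  · have hm := PySem.Int.floordiv_eq_ediv_of_pos (a := s + e) (b := 2) (by norm_num)
    omega

theorem goA_eq_spec (fps maxd mind : Int) (hmax : 0 ≤ maxd) :
    ∀ (fuel : Nat) (s e : Int), (e - s).toNat < fuel →
      goA fuel (s, e) fps maxd mind = splitSpec s e maxd mind := by
  intro fuel
  induction fuel with
  | zero => intro s e h; omega
  | succ f ih =>
    intro s e h
    have hm := PySem.Int.floordiv_eq_ediv_of_pos (a := s + e) (b := 2) (by norm_num)
    rw [splitSpec]
    simp only [goA]
    by_cases h1 : mind ≤ e - s ∧ e - s ≤ maxd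
    · simp [h1]
    · by_cases h2 : maxd < e - s
      · rw [if_neg h1, if_neg h1, if_pos h2, dif_pos ⟨h2, hmax⟩,
          ih s (PySem.Int.floordiv (s + e) 2) (by omega),
          ih (PySem.Int.floordiv (s + e) 2 + 1) e (by omega)]
      · simp [h2]

def specFlat (maxd mind : Int) (segs : List (Int × Int)) : List (Int × Int) :=
  segs.flatMap (fun p => splitSpec p.1 p.2 maxd mind)

theorem bStep_eq_flatMap (maxd : Int) (segs : List (Int × Int)) :
    bStep maxd segs = segs.flatMap (fun p =>
      if p.2 - p.1 > maxd then
        [(p.1, PySem.Int.floordiv (p.1 + p.2) 2), (PySem.Int.floordiv (p.1 + p.2) 2 + 1, p.2)]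
      else [p]) := by
  unfold bStep
  rw [show (fun (nxt : List (Int × Int)) (p : Int × Int) =>
      if p.2 - p.1 > maxd then
        nxt ++ [(p.1, PySem.Int.floordiv (p.1 + p.2) 2), (PySem.Int.floordiv (p.1 + p.2) 2 + 1, p.2)]
      else nxt ++ [p]) = (fun nxt p => nxt ++
        (if p.2 - p.1 > maxd then
          [(p.1, PySem.Int.floordiv (p.1 + p.2) 2), (PySem.Int.floordiv (p.1 + p.2) 2 + 1, p.2)]
        else [p])) from by funext nxt p; split <;> rfl]
  rw [PySem.List.foldl_append_eq_flatMap]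
  simp

theorem specFlat_bStep (maxd mind : Int) (hmax : 0 ≤ maxd) (segs : List (Int × Int)) :
    specFlat maxd mind (bStep maxd segs) = specFlat maxd mind segs := by
  rw [bStep_eq_flatMap]
  unfold specFlat
  induction segs with
  | nil => rfl
  | cons p t ih =>
    rw [List.flatMap_cons, List.flatMap_cons, List.flatMap_append, ih]
    congr 1
    by_cases hc : p.2 - p.1 > maxd
    · rw [if_pos hc]
      conv_rhs => rw [splitSpec]
      have h1 : ¬ (mind ≤ p.2 - p.1 ∧ p.2 - p.1 ≤ maxd) := by omega
      rw [if_neg h1, dif_pos ⟨hc, hmax⟩]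
      simp
    · rw [if_neg hc]; simp

theorem filter_eq_specFlat (maxd mind : Int) (segs : List (Int × Int))
    (hall : ∀ p ∈ segs, p.2 - p.1 ≤ maxd) :
    segs.filter (fun p => decide (mind ≤ p.2 - p.1 ∧ p.2 - p.1 ≤ maxd)) = specFlat maxd mind segs := by
  induction segs with
  | nil => rfl
  | cons p t ih =>
    have hp := hall p (by simp)
    have ht : ∀ q ∈ t, q.2 - q.1 ≤ maxd := fun q hq => hall q (by simp [hq])
    rw [List.filter_cons]
    unfold specFlat
    rw [List.flatMap_cons, splitSpec]
    by_cases h1 : mind ≤ p.2 - p.1 ∧ p.2 - p.1 ≤ maxd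
    · simp only [h1]
      rw [ih ht]; rfl
    · have : ¬ (maxd < p.2 - p.1 ∧ 0 ≤ maxd) := by omega
      simp only [h1, decide_false, dif_neg this]
      rw [ih ht]; rfl

theorem bLoop_spec (maxd mind : Int) (hmax : 0 ≤ maxd) :
    ∀ (fuel : Nat) (segs : List (Int × Int)),
      (∀ p ∈ segs, p.2 - p.1 ≤ maxd + fuel) →
      (bLoop fuel maxd segs).filter (fun p => decide (mind ≤ p.2 - p.1 ∧ p.2 - p.1 ≤ maxd)) =
        specFlat maxd mind segs := by
  intro fuel
  induction fuel with
  | zero =>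
    intro segs hall
    exact filter_eq_specFlat maxd mind segs (by intro p hp; have := hall p hp; omega)
  | succ f ih =>
    intro segs hall
    simp only [bLoop]
    by_cases hany : segs.any (fun p => decide (p.2 - p.1 > maxd)) = true
    · rw [if_pos hany, ih (bStep maxd segs) ?_, specFlat_bStep maxd mind hmax]
      intro q hq
      rw [bStep_eq_flatMap] at hq
      rcases List.mem_flatMap.mp hq with ⟨p, hp, hq2⟩
      have hb := hall p hp
      by_cases hc : p.2 - p.1 > maxd
      · rw [if_pos hc] at hq2
        have hm := PySem.Int.floordiv_eq_ediv_of_pos (a := p.1 + p.2) (b := 2) (by norm_num)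
        simp only [List.mem_cons, List.not_mem_nil, or_false] at hq2
        rcases hq2 with h | h
        · subst h
          show PySem.Int.floordiv (p.1 + p.2) 2 - p.1 ≤ maxd + ((f : Nat) : Int)
          rw [hm]; omega
        · subst h
          show p.2 - (PySem.Int.floordiv (p.1 + p.2) 2 + 1) ≤ maxd + ((f : Nat) : Int)
          rw [hm]; omega
      · rw [if_neg hc] at hq2
        simp only [List.mem_singleton] at hq2
        subst hq2; omega
    · rw [if_neg hany]
      apply filter_eq_specFlat
      intro p hp
      simp only [List.any_eq_true, not_exists, not_and, decide_eq_true_eq] at hany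
      have := hany p hp
      omega

-- ===== VERDICT (by name: the statement is the Claim_ definition above) =====
theorem split_scene_recursively_spec : Claim_equal_split_scene_recursively := by
  intro scene fps maxd mind _ hpre
  unfold Spec_split_scene_recursively
  obtain ⟨s, e⟩ := scene
  unfold split_scene_recursively split_scene_recursively_alt
  rcases hpre with hmax | hle
  · rw [goA_eq_spec fps maxd mind hmax _ s e (by omega),
      bLoop_spec maxd mind hmax _ [(s, e)] (by intro p hp; simp at hp; subst hp; simp; omega)]
    unfold specFlat
    simp
  · by_cases hmax : 0 ≤ maxd
    · rw [goA_eq_spec fps maxd mind hmax _ s e (by omega),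
        bLoop_spec maxd mind hmax _ [(s, e)] (by intro p hp; simp at hp; subst hp; simp; omega)]
      unfold specFlat
      simp
    · -- maxd < 0 and e - s ≤ maxd: both sides compute directly
      have hd : (e - s).toNat = 0 := by omega
      rw [hd]
      simp only [goA, bLoop, bStep]
      have h2 : ¬ (e - s > maxd) := by omega
      have h3 : (mind ≤ e - s ∧ e - s ≤ maxd) ↔ mind ≤ e - s := by
        constructor
        · exact fun h => h.1
        · exact fun h => ⟨h, by omega⟩
      by_cases hmn : mind ≤ e - s
      · simp [h2, hmn, show e - s ≤ maxd from by omega, show e ≤ maxd + s from by omega, List.filter]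
      · simp [h2, hmn, List.filter]
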